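-- pv_equiv track=rewrite | github.com/bcartwright13/DecisionTrees | q2_decision_tree.py | dataset_split_by_feature
-- ===== SOURCE A (Python) =====
-- def dataset_split_by_feature(dataset, feature, label):
--     subset = {}
--     for i, value in enumerate(dataset[feature]):
--             classification = dataset[label][i]
--             if value not in subset:
--                 subset[value] = [0, 0]
--             if classification == "e":
--                 subset[value][0] += 1
--             else:
--                 subset[value][1] += 1
--     return subset
-- ===== SOURCE B (Python) =====
-- def dataset_split_by_feature(dataset, feature, label):
--     buckets = {}
--     for i, value in enumerate(dataset[feature]):
--         buckets.setdefault(value, []).append(dataset[label][i])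
--     return {value: [labs.count("e"), len(labs) - labs.count("e")]
--             for value, labs in buckets.items()}
-- ===== Notes on version B (the rewrite author's own statement) =====
-- stated objective: alternative
-- what changed: Two differently-shaped passes replace the interleaved counting loop: first group the raw label strings per feature value into lists, then derive each [edible, poisonous] pair by counting 'e' in the finished bucket, instead of maintaining running counts updated in place.
import Mathlib
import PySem

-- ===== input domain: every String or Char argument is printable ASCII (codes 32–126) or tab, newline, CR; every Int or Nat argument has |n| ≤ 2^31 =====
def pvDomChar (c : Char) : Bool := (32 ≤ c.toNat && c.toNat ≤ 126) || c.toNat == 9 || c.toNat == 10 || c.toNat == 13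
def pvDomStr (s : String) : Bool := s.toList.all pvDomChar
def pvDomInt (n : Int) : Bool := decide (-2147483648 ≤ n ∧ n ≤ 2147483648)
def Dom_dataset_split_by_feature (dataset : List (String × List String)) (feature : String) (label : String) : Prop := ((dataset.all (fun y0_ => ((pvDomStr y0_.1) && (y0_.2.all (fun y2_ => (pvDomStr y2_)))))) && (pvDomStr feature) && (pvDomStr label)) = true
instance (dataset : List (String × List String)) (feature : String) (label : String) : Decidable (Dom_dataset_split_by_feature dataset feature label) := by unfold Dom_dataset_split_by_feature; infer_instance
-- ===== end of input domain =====

-- B groups raw label strings per feature value, then counts each finished bucket;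
-- same return value as A (a different decomposition, not faster).

-- ===== PORT A =====
-- subset[value][0] += 1  (the stored list is always a pair [e_count, p_count])
def pvIncFst (p : List Int) : List Int := [p.getD 0 0 + 1, p.getD 1 0]
-- subset[value][1] += 1
def pvIncSnd (p : List Int) : List Int := [p.getD 0 0, p.getD 1 0 + 1]

def dataset_split_by_feature (dataset : List (String × List String)) (feature : String) (label : String) : List (String × List Int) :=
  let d := PySem.Dict.mk dataset
  -- for i, value in enumerate(dataset[feature]): … ; Pre_ excludes the KeyError/IndexError inputs
  let subset := (PySem.List.enumerate (d.getD feature [])).foldl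
    (fun subset iv =>
      let classification := (PySem.List.pyGet? (d.getD label []) iv.1).getD ""
      let subset := if subset.contains iv.2 then subset else subset.insert iv.2 [0, 0]
      if classification == "e" then subset.modify iv.2 [0, 0] pvIncFst
      else subset.modify iv.2 [0, 0] pvIncSnd)
    PySem.Dict.empty
  subset.items

-- ===== PORT B =====
def dataset_split_by_feature_alt (dataset : List (String × List String)) (feature : String) (label : String) : List (String × List Int) :=
  let d := PySem.Dict.mk dataset
  -- buckets.setdefault(value, []).append(dataset[label][i])
  let buckets := (PySem.List.enumerate (d.getD feature [])).foldl
    (fun b iv =>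
      b.modify iv.2 [] (fun ls => ls ++ [(PySem.List.pyGet? (d.getD label []) iv.1).getD ""]))
    PySem.Dict.empty
  buckets.items.map (fun kv =>
    (kv.1, [(PySem.List.count kv.2 "e" : Int),
            (kv.2.length : Int) - (PySem.List.count kv.2 "e" : Int)]))

-- ===== PRECONDITION & SPEC =====
-- Pre_ excludes exactly the inputs where the Python A raises: a missing feature key (KeyError),
-- and — when the feature column is non-empty — a missing label key or a label column shorter
-- than the feature column (KeyError/IndexError at dataset[label][i]).
def Pre_dataset_split_by_feature (dataset : List (String × List String)) (feature : String) (label : String) : Prop :=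
  (PySem.Dict.mk dataset).contains feature = true ∧
  ((PySem.Dict.mk dataset).getD feature [] = [] ∨
    ((PySem.Dict.mk dataset).contains label = true ∧
     ((PySem.Dict.mk dataset).getD feature []).length ≤ ((PySem.Dict.mk dataset).getD label []).length))
instance (dataset : List (String × List String)) (feature : String) (label : String) : Decidable (Pre_dataset_split_by_feature dataset feature label) := by unfold Pre_dataset_split_by_feature; infer_instance

def pvWitness_dataset_split_by_feature : (List (String × List String)) × String × String :=
  ([("color", ["r", "g", "r"]), ("class", ["e", "p", "e"])], "color", "class")

def Spec_dataset_split_by_feature (dataset : List (String × List String)) (feature : String) (label : String) (out : List (String × List Int)) : Prop := out = dataset_split_by_feature_alt dataset feature label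
instance (dataset : List (String × List String)) (feature : String) (label : String) (out : List (String × List Int)) : Decidable (Spec_dataset_split_by_feature dataset feature label out) := by unfold Spec_dataset_split_by_feature; infer_instance

-- ===== CLAIM (what is proved, stated in full; the proofs are below) =====
def Claim_equal_dataset_split_by_feature : Prop := ∀ (dataset : List (String × List String)) (feature : String) (label : String), Dom_dataset_split_by_feature dataset feature label → Pre_dataset_split_by_feature dataset feature label → Spec_dataset_split_by_feature dataset feature label (dataset_split_by_feature dataset feature label)

-- ===== LEMMAS AND PROOFS =====

-- the bucket-to-counts map of port B
def pvCnt (kv : String × List String) : String × List Int :=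
  (kv.1, [(PySem.List.count kv.2 "e" : Int),
          (kv.2.length : Int) - (PySem.List.count kv.2 "e" : Int)])

-- one loop iteration: A's count update on the pvCnt-image equals pvCnt of B's bucket update
lemma pv_contains_map (v : String) (b : PySem.Dict String (List String)) :
    (PySem.Dict.mk (b.items.map pvCnt)).contains v = b.contains v := by
  simp [PySem.Dict.contains, List.any_map, Function.comp_def, pvCnt]

lemma pv_get?_map (v : String) (b : PySem.Dict String (List String)) :
    (PySem.Dict.mk (b.items.map pvCnt)).get? v
      = (b.get? v).map (fun ls => [(PySem.List.count ls "e" : Int),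
          (ls.length : Int) - (PySem.List.count ls "e" : Int)]) := by
  simp [PySem.Dict.get?, List.find?_map, Function.comp_def, pvCnt, Option.map_map]

lemma pv_step_comm (v c : String) (b : PySem.Dict String (List String)) :
    (let s := PySem.Dict.mk (b.items.map pvCnt)
     let s := if s.contains v then s else s.insert v [0, 0]
     if c == "e" then s.modify v [0, 0] pvIncFst else s.modify v [0, 0] pvIncSnd)
    = PySem.Dict.mk ((b.modify v [] (fun ls => ls ++ [c])).items.map pvCnt) := by
  simp only []
  rw [pv_contains_map]
  by_cases hb : b.contains v = true
  · -- key already present: both sides replace in place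
    rw [if_pos hb]
    obtain ⟨ls, hls⟩ : ∃ ls, b.get? v = some ls := by
      cases h : b.get? v with
      | none => rw [PySem.Dict.contains_eq_isSome_get?, h] at hb; simp at hb
      | some ls => exact ⟨ls, rfl⟩
    have hgd : (PySem.Dict.mk (b.items.map pvCnt)).getD v [0, 0] = (pvCnt (v, ls)).2 := by
      simp [PySem.Dict.getD, pv_get?_map, hls, pvCnt]
    have hbm : (PySem.Dict.mk (b.items.map pvCnt)).contains v = true := by
      rw [pv_contains_map]; exact hb
    have hB : (b.modify v [] (fun ls => ls ++ [c])).items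
        = b.items.map (fun p => if p.1 == v then (v, ls ++ [c]) else p) := by
      unfold PySem.Dict.modify
      rw [PySem.Dict.items_insert_of_contains _ _ hb]
      have : b.getD v [] = ls := by simp [PySem.Dict.getD, hls]
      rw [this]
    have hA : ∀ inc : List Int → List Int,
        ((PySem.Dict.mk (b.items.map pvCnt)).modify v [0, 0] inc).items
        = (b.items.map pvCnt).map (fun q => if q.1 == v then (v, inc (pvCnt (v, ls)).2) else q) := by
      intro inc
      unfold PySem.Dict.modify
      rw [PySem.Dict.items_insert_of_contains _ _ hbm, hgd]
    apply PySem.Dict.ext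
    by_cases hc : (c == "e") = true
    · rw [if_pos hc, hA, List.map_map, hB, List.map_map]
      have hc' : c = "e" := by simpa using hc
      subst hc'
      apply List.map_congr_left
      intro p _
      by_cases hp : (p.1 == v) = true
      · simp only [Function.comp_def, pvCnt, hp, if_true, pvIncFst]
        simp [List.count_append]
      · have hp' : p.1 ≠ v := by simpa using hp
        simp [Function.comp_def, pvCnt, hp']
    · rw [if_neg hc, hA, List.map_map, hB, List.map_map]
      have hc' : ¬ c = "e" := by simpa using hc
      apply List.map_congr_left
      intro p _
      by_cases hp : (p.1 == v) = true
      · simp only [Function.comp_def, pvCnt, hp, if_true, pvIncSnd]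
        simp [List.count_append, hc']
        omega
      · have hp' : p.1 ≠ v := by simpa using hp
        simp [Function.comp_def, pvCnt, hp']
  · -- fresh key: both sides append
    rw [if_neg hb]
    have hb' : b.contains v = false := by simpa using hb
    have hkeys : ∀ p ∈ b.items, (p.1 == v) = false := by
      intro p hp
      by_contra h
      have : b.contains v = true := by
        unfold PySem.Dict.contains
        exact List.any_eq_true.2 ⟨p, hp, by simpa using h⟩
      simp [this] at hb'
    have hmkeys : ∀ q ∈ b.items.map pvCnt, (q.1 == v) = false := by
      intro q hq
      obtain ⟨p, hp, rfl⟩ := List.mem_map.1 hq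
      exact hkeys p hp
    have hins : ((PySem.Dict.mk (b.items.map pvCnt)).insert v [0, 0]).items
        = b.items.map pvCnt ++ [(v, [0, 0])] := by
      apply PySem.Dict.items_insert_of_not_contains
      rw [pv_contains_map]; exact hb'
    have hcont2 : ((PySem.Dict.mk (b.items.map pvCnt)).insert v [0, 0]).contains v = true :=
      PySem.Dict.contains_insert_self _ _ _
    have hgd2 : ((PySem.Dict.mk (b.items.map pvCnt)).insert v [0, 0]).getD v [0, 0] = [0, 0] := by
      unfold PySem.Dict.getD PySem.Dict.get?
      rw [hins, List.find?_append]
      have : (b.items.map pvCnt).find? (fun p => p.1 == v) = none := by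
        rw [List.find?_eq_none]
        intro q hq; simp [hmkeys q hq]
      simp [this]
    have hBitems : (b.modify v [] (fun ls => ls ++ [c])).items = b.items ++ [(v, [c])] := by
      unfold PySem.Dict.modify
      have : b.getD v [] = [] := PySem.Dict.getD_of_not_contains _ _ hb'
      rw [this]
      simpa using PySem.Dict.items_insert_of_not_contains _ _ hb'
    apply PySem.Dict.ext
    rw [hBitems]
    have main : ∀ inc : List Int → List Int,
        (((PySem.Dict.mk (b.items.map pvCnt)).insert v [0, 0]).modify v [0, 0] inc).items
        = b.items.map pvCnt ++ [(v, inc [0, 0])] := by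
      intro inc
      unfold PySem.Dict.modify
      rw [PySem.Dict.items_insert_of_contains _ _ hcont2, hgd2, hins, List.map_append]
      congr 1
      · conv_rhs => rw [← List.map_id (List.map pvCnt b.items)]
        apply List.map_congr_left
        intro q hq; simp [hmkeys q hq]
      · simp
    by_cases hc : (c == "e") = true
    · rw [if_pos hc, main]
      have hc' : c = "e" := by simpa using hc
      subst hc'
      simp [pvCnt, pvIncFst, PySem.List.count, List.map_append]
    · rw [if_neg hc, main]
      have hc' : ¬ c = "e" := by simpa using hc
      simp [pvCnt, pvIncSnd, PySem.List.count, List.map_append, hc']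

-- fold invariant: A's running dict is the pvCnt-image of B's running dict
lemma pv_fold_comm (g : Int × String → String) :
    ∀ (l : List (Int × String)) (b : PySem.Dict String (List String)),
    (l.foldl
      (fun subset iv =>
        let classification := g iv
        let subset := if subset.contains iv.2 then subset else subset.insert iv.2 [0, 0]
        if classification == "e" then subset.modify iv.2 [0, 0] pvIncFst
        else subset.modify iv.2 [0, 0] pvIncSnd)
      (PySem.Dict.mk (b.items.map pvCnt)))
    = PySem.Dict.mk
        ((l.foldl (fun b iv => b.modify iv.2 [] (fun ls => ls ++ [g iv])) b).items.map pvCnt) := by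
  intro l
  induction l with
  | nil => intro b; rfl
  | cons iv t ih =>
    intro b
    simp only [List.foldl_cons]
    rw [pv_step_comm iv.2 (g iv) b]
    exact ih _

-- ===== VERDICT (by name: the statement is the Claim_ definition above) =====
theorem dataset_split_by_feature_spec : Claim_equal_dataset_split_by_feature := by
  intro dataset feature label _ _
  unfold Spec_dataset_split_by_feature dataset_split_by_feature dataset_split_by_feature_alt
  have h := pv_fold_comm
    (fun iv => (PySem.List.pyGet? ((PySem.Dict.mk dataset).getD label []) iv.1).getD "")
    (PySem.List.enumerate ((PySem.Dict.mk dataset).getD feature [])) PySem.Dict.empty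
  simp only at h ⊢
  rw [show (PySem.Dict.empty : PySem.Dict String (List Int)) = PySem.Dict.mk ((PySem.Dict.empty : PySem.Dict String (List String)).items.map pvCnt) from rfl]
  rw [h]
  rfl
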